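-- pv_equiv track=rewrite | github.com/jchy20/how-much-backtrack | reasoning-gym/reasoning_gym/arc/arc_1d_tasks.py | transform_gravity_weighted_colors
-- ===== SOURCE A (Python) =====
-- def transform_gravity_weighted_colors(input_grid: list[int], direction: str = "right") -> list[int]:
--     size = len(input_grid)
--     # Count occurrences
--     count1 = sum(1 for x in input_grid if x == 1)
--     count2 = sum(1 for x in input_grid if x == 2)
--
--     output = [0] * size
--
--     if direction == "right":
--         # Place all 2's first, then 1's
--         for i in range(count2):
--             output[i] = 2
--         for i in range(count1):
--             output[count2 + i] = 1
--
--     elif direction == "left":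
--         # Place all 2's at the right end, then 1's before them
--         for i in range(count2):
--             output[size - 1 - i] = 2
--         for i in range(count1):
--             output[size - 1 - count2 - i] = 1
--
--     else:
--         raise ValueError("direction must be 'right' or 'left'")
--
--     return output
-- ===== SOURCE B (Python) =====
-- def transform_gravity_weighted_colors(input_grid: list[int], direction: str = "right") -> list[int]:
--     mapped = [x if x in (1, 2) else 0 for x in input_grid]
--     if direction == "right":
--         return sorted(mapped, reverse=True)
--     elif direction == "left":
--         return sorted(mapped)
--     else:
--         raise ValueError("direction must be 'right' or 'left'")
-- ===== Notes on version B (the rewrite author's own statement) =====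
-- stated objective: simpler
-- what changed: A counts 1's and 2's and fills a zero-initialized output by writing indices in two loops per direction; B maps every non-{1,2} value to 0 and returns one comparison sort (descending for 'right', ascending for 'left').
-- outside the precondition, e.g. on transform_gravity_weighted_colors([1, 2, 0], 'up'): A raises ValueError, B raises ValueError
import Mathlib
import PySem

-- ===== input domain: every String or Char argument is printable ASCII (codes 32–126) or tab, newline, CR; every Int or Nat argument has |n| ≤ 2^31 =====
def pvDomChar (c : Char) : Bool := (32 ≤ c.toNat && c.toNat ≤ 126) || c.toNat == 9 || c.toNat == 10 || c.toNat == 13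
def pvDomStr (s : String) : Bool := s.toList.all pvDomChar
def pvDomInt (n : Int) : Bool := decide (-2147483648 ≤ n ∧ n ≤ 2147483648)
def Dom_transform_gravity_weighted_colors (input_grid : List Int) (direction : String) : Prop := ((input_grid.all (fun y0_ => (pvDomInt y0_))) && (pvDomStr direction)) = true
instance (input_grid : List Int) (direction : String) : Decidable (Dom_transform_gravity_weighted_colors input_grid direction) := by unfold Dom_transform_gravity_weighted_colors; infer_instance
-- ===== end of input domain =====

-- B replaces A's counting-and-index-filling with "map stray colors to 0, then one comparison sort" (objective: simpler).

-- ===== PORT A =====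
-- Literal port of A. The `.toNat` on each set index is exact: every index A writes is
-- provably nonnegative and within range (count1 + count2 ≤ size), so no clamping occurs.
def transform_gravity_weighted_colors (input_grid : List Int) (direction : String) : List Int :=
  let size : Int := input_grid.length
  let count1 : Int := input_grid.foldl (fun acc x => if x == 1 then acc + 1 else acc) 0
  let count2 : Int := input_grid.foldl (fun acc x => if x == 2 then acc + 1 else acc) 0
  let output : List Int := List.replicate size.toNat 0
  if direction = "right" then
    let output := (PySem.List.pyRange 0 count2).foldl (fun o i => o.set i.toNat 2) output
    let output := (PySem.List.pyRange 0 count1).foldl (fun o i => o.set (count2 + i).toNat 1) output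
    output
  else if direction = "left" then
    let output := (PySem.List.pyRange 0 count2).foldl (fun o i => o.set (size - 1 - i).toNat 2) output
    let output := (PySem.List.pyRange 0 count1).foldl (fun o i => o.set (size - 1 - count2 - i).toNat 1) output
    output
  else []  -- Python raises ValueError here; excluded by Pre_

-- ===== PORT B =====
def transform_gravity_weighted_colors_alt (input_grid : List Int) (direction : String) : List Int :=
  let mapped : List Int := input_grid.map (fun x => if x == 1 || x == 2 then x else 0)
  if direction = "right" then
    PySem.List.sorted mapped (fun x => x) true
  else if direction = "left" then
    PySem.List.sorted mapped (fun x => x) false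
  else []  -- ValueError; excluded by Pre_

-- ===== PRECONDITION & SPEC =====
-- Pre_ excludes exactly the directions on which Python A raises ValueError.
def Pre_transform_gravity_weighted_colors (input_grid : List Int) (direction : String) : Prop :=
  direction = "right" ∨ direction = "left"
instance (input_grid : List Int) (direction : String) : Decidable (Pre_transform_gravity_weighted_colors input_grid direction) := by unfold Pre_transform_gravity_weighted_colors; infer_instance
def pvWitness_transform_gravity_weighted_colors : List Int × String := ([2, 0, 1, 3, 2, 1], "left")

def Spec_transform_gravity_weighted_colors (input_grid : List Int) (direction : String) (out : List Int) : Prop := out = transform_gravity_weighted_colors_alt input_grid direction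
instance (input_grid : List Int) (direction : String) (out : List Int) : Decidable (Spec_transform_gravity_weighted_colors input_grid direction out) := by unfold Spec_transform_gravity_weighted_colors; infer_instance

-- ===== CLAIM (what is proved, stated in full; the proofs are below) =====
def Claim_equal_transform_gravity_weighted_colors : Prop := ∀ (input_grid : List Int) (direction : String), Dom_transform_gravity_weighted_colors input_grid direction → Pre_transform_gravity_weighted_colors input_grid direction → Spec_transform_gravity_weighted_colors input_grid direction (transform_gravity_weighted_colors input_grid direction)

-- ===== LEMMAS AND PROOFS =====

-- 1's and 2's together never outnumber the elements
theorem pv_count12_le (g : List Int) : g.count 1 + g.count 2 ≤ g.length := by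
  induction g with
  | nil => simp
  | cons h t ih =>
    simp only [List.count_cons, List.length_cons]
    by_cases h1 : h = 1 <;> by_cases h2 : h = 2 <;> simp_all <;> omega

-- the ascending canonical form: 0's, then 1's, then 2's
def pvAsc (g : List Int) : List Int :=
  List.replicate (g.length - g.count 1 - g.count 2) 0 ++
  List.replicate (g.count 1) 1 ++ List.replicate (g.count 2) 2

theorem pvMapped_perm_asc (g : List Int) :
    (g.map (fun x => if x == 1 || x == 2 then x else 0)).Perm (pvAsc g) := by
  induction g with
  | nil => simp [pvAsc]
  | cons h t ih =>
    have hle := pv_count12_le t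
    simp only [List.map_cons]
    by_cases h1 : h = 1
    · subst h1
      have e : pvAsc (1 :: t) = List.replicate (t.length - t.count 1 - t.count 2) 0 ++
          ((1 : Int) :: (List.replicate (t.count 1) 1 ++ List.replicate (t.count 2) 2)) := by
        unfold pvAsc
        rw [List.count_cons_self, List.count_cons_of_ne (by decide), List.length_cons,
            show t.length + 1 - (t.count 1 + 1) - t.count 2 = t.length - t.count 1 - t.count 2 by omega,
            List.replicate_succ, List.append_assoc, List.cons_append]
      rw [e, show (if ((1:Int) == 1 || (1:Int) == 2) = true then (1:Int) else 0) = 1 from rfl]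
      exact (ih.cons 1).trans (by rw [pvAsc, List.append_assoc]; exact List.perm_middle.symm)
    · by_cases h2 : h = 2
      · subst h2
        have e : pvAsc (2 :: t) = (List.replicate (t.length - t.count 1 - t.count 2) 0 ++
            List.replicate (t.count 1) 1) ++ ((2 : Int) :: List.replicate (t.count 2) 2) := by
          unfold pvAsc
          rw [List.count_cons_self, List.count_cons_of_ne (by decide), List.length_cons,
              show t.length + 1 - t.count 1 - (t.count 2 + 1) = t.length - t.count 1 - t.count 2 by omega,
              List.replicate_succ]
        rw [e, show (if ((2:Int) == 1 || (2:Int) == 2) = true then (2:Int) else 0) = 2 from rfl]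
        exact (ih.cons 2).trans (by rw [pvAsc]; exact List.perm_middle.symm)
      · have e : pvAsc (h :: t) = (0 : Int) :: pvAsc t := by
          unfold pvAsc
          have hc1 : List.count 1 (h::t) = List.count 1 t := by simp [h1]
          have hc2 : List.count 2 (h::t) = List.count 2 t := by simp [h2]
          rw [hc1, hc2, List.length_cons,
              show t.length + 1 - t.count 1 - t.count 2 = (t.length - t.count 1 - t.count 2) + 1 by omega,
              List.replicate_succ, List.cons_append, List.cons_append]
        rw [e, show (if (h == 1 || h == 2) = true then h else 0) = 0 by simp [h1, h2]]
        exact ih.cons 0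

theorem pvAsc_pairwise (g : List Int) : (pvAsc g).Pairwise (· ≤ ·) := by
  unfold pvAsc
  simp [List.pairwise_append, List.pairwise_replicate, List.mem_replicate]
  intros; omega

-- the descending canonical form: 2's, then 1's, then 0's
def pvDesc (g : List Int) : List Int :=
  List.replicate (g.count 2) 2 ++ List.replicate (g.count 1) 1 ++
  List.replicate (g.length - g.count 1 - g.count 2) 0

theorem pvAsc_perm_desc (g : List Int) : (pvAsc g).Perm (pvDesc g) := by
  unfold pvAsc pvDesc
  refine List.Perm.trans List.perm_append_comm ?_
  rw [List.append_assoc (List.replicate (g.count 2) (2:Int))]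
  exact List.Perm.append_left _ List.perm_append_comm

theorem pvDesc_pairwise (g : List Int) : (pvDesc g).Pairwise (fun a b : Int => b ≤ a) := by
  unfold pvDesc
  simp [List.pairwise_append, List.pairwise_replicate, List.mem_replicate]
  intros; omega

-- B's two sorts produce exactly the canonical forms
theorem pvSorted_left (g : List Int) :
    PySem.List.sorted (g.map (fun x => if x == 1 || x == 2 then x else 0)) (fun x => x) false = pvAsc g :=
  PySem.List.sorted_id_eq_of_perm_of_pairwise _ _ (pvMapped_perm_asc g).symm (pvAsc_pairwise g)

theorem pvSorted_right (g : List Int) :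
    PySem.List.sorted (g.map (fun x => if x == 1 || x == 2 then x else 0)) (fun x => x) true = pvDesc g := by
  apply PySem.List.eq_of_perm_of_pairwise_le_of_injective (fun x : Int => -x) neg_injective
  · exact (PySem.List.sorted_perm _ _ _).trans ((pvMapped_perm_asc g).trans (pvAsc_perm_desc g))
  · exact (PySem.List.sorted_pairwise_rev _ _).imp (fun h => by omega)
  · exact (pvDesc_pairwise g).imp (fun h => by omega)

-- A's fill loops, characterised element-wise
theorem pvFill_length (f : Nat → Nat) (v : Int) (is : List Nat) :
    ∀ (l : List Int), (is.foldl (fun o i => o.set (f i) v) l).length = l.length := by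
  induction is with
  | nil => intro l; rfl
  | cons i t ih => intro l; simp [List.foldl_cons, ih]

theorem pvFill_getElem? (f : Nat → Nat) (v : Int) (is : List Nat) :
    ∀ (l : List Int) (j : Nat), (is.foldl (fun o i => o.set (f i) v) l)[j]? =
      if j ∈ is.map f ∧ j < l.length then some v else l[j]? := by
  induction is with
  | nil => intro l j; simp
  | cons i t ih =>
    intro l j
    rw [List.foldl_cons, ih]
    by_cases hmem : j ∈ t.map f
    · by_cases hj : j < l.length
      · simp [hmem, hj]
      · simp only [List.length_set, List.map_cons, List.mem_cons]
        rw [if_neg (by tauto), if_neg (by tauto),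
            List.getElem?_eq_none (by simpa using (by omega : l.length ≤ j)),
            List.getElem?_eq_none (by omega)]
    · simp only [List.length_set, List.map_cons, List.mem_cons, List.getElem?_set, hmem]
      split_ifs <;> simp_all

theorem pv_mem_map_add_range (c k j : Nat) :
    j ∈ (List.range k).map (fun i => c + i) ↔ c ≤ j ∧ j < c + k := by
  simp only [List.mem_map, List.mem_range]
  constructor
  · rintro ⟨i, hi, rfl⟩; omega
  · intro h; exact ⟨j - c, by omega, by omega⟩

theorem pv_mem_map_revrange (m k j : Nat) (hk : k ≤ m) :
    j ∈ (List.range k).map (fun i => m - 1 - i) ↔ m - k ≤ j ∧ j < m := by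
  simp only [List.mem_map, List.mem_range]
  constructor
  · rintro ⟨i, hi, rfl⟩; omega
  · intro h; exact ⟨m - 1 - j, by omega, by omega⟩

theorem pvA_right (g : List Int) :
    (List.range (g.count 1)).foldl (fun o i => o.set (g.count 2 + i) 1)
      ((List.range (g.count 2)).foldl (fun o i => o.set i 2) (List.replicate g.length 0)) = pvDesc g := by
  have hle := pv_count12_le g
  apply List.ext_getElem?
  intro j
  rw [pvFill_getElem? (fun i => g.count 2 + i) 1,
      pvFill_getElem? (fun i => i) 2]
  rw [pvFill_length, List.map_id']
  simp only [pvDesc, pv_mem_map_add_range, List.mem_range, List.getElem?_append,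
    List.getElem?_replicate, List.length_replicate, List.length_append]
  split_ifs <;> simp_all <;> omega

theorem pvA_left (g : List Int) :
    (List.range (g.count 1)).foldl (fun o i => o.set (g.length - g.count 2 - 1 - i) 1)
      ((List.range (g.count 2)).foldl (fun o i => o.set (g.length - 1 - i) 2) (List.replicate g.length 0)) = pvAsc g := by
  have hle := pv_count12_le g
  apply List.ext_getElem?
  intro j
  rw [pvFill_getElem? (fun i => g.length - g.count 2 - 1 - i) 1,
      pvFill_getElem? (fun i => g.length - 1 - i) 2]
  rw [pvFill_length]
  simp only [pv_mem_map_revrange (g.length - g.count 2) (g.count 1) j (by omega),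
      pv_mem_map_revrange g.length (g.count 2) j (by omega)]
  simp only [pvAsc, List.getElem?_append, List.getElem?_replicate, List.length_replicate,
    List.length_append]
  split_ifs <;> simp_all <;> omega

theorem pv_main (g : List Int) (dir : String) (h : dir = "right" ∨ dir = "left") :
    transform_gravity_weighted_colors g dir = transform_gravity_weighted_colors_alt g dir := by
  have hc1 : g.foldl (fun acc x => if x == 1 then acc + 1 else acc) (0:Int) = ((g.count 1 : Nat) : Int) := by
    rw [PySem.List.foldl_count_if (fun x => x == 1) g 0, zero_add]; rfl
  have hc2 : g.foldl (fun acc x => if x == 2 then acc + 1 else acc) (0:Int) = ((g.count 2 : Nat) : Int) := by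
    rw [PySem.List.foldl_count_if (fun x => x == 2) g 0, zero_add]; rfl
  have hle := pv_count12_le g
  rcases h with h | h <;> subst h
  · simp only [transform_gravity_weighted_colors, transform_gravity_weighted_colors_alt, hc1, hc2]
    simp only [reduceIte]
    rw [PySem.List.pyRange_zero_nat, PySem.List.pyRange_zero_nat, List.foldl_map, List.foldl_map]
    simp only [Int.toNat_natCast, ← Nat.cast_add, Int.toNat_natCast]
    rw [pvSorted_right, pvA_right]
  · simp only [transform_gravity_weighted_colors, transform_gravity_weighted_colors_alt, hc1, hc2]
    simp only [show (("left":String) = "right") = False by simp, if_false, reduceIte]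
    rw [PySem.List.pyRange_zero_nat, PySem.List.pyRange_zero_nat, List.foldl_map, List.foldl_map]
    rw [PySem.List.foldl_congr_mem (List.range (g.count 2))
        (fun (o : List Int) (i : Nat) => o.set (((g.length : Int) - 1 - (i : Int)).toNat) 2)
        (fun (o : List Int) (i : Nat) => o.set (g.length - 1 - i) 2) _ (by
      intro acc i hi
      simp only [List.mem_range] at hi
      beta_reduce
      congr 1
      omega)]
    rw [PySem.List.foldl_congr_mem (List.range (g.count 1))
        (fun (o : List Int) (i : Nat) => o.set (((g.length : Int) - 1 - (g.count 2 : Int) - (i : Int)).toNat) 1)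
        (fun (o : List Int) (i : Nat) => o.set (g.length - g.count 2 - 1 - i) 1) _ (by
      intro acc i hi
      simp only [List.mem_range] at hi
      beta_reduce
      congr 1
      omega)]
    rw [Int.toNat_natCast]
    rw [pvSorted_left, pvA_left]

-- ===== VERDICT (by name: the statement is the Claim_ definition above) =====
theorem transform_gravity_weighted_colors_spec : Claim_equal_transform_gravity_weighted_colors := by
  intro input_grid direction _ hpre
  unfold Spec_transform_gravity_weighted_colors
  exact pv_main input_grid direction hpre
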